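-- pv_equiv track=rewrite | github.com/mblsha/retrobus-explorer | gateware/reference/spade-projects/sharp-pc-e500-card-spade/experiments/experiment_catalog.py | build_asm_pushu_a_sc_popu_imr_chain
-- ===== SOURCE A (Python) =====
-- def build_asm_pushu_a_sc_popu_imr_chain(count: int) -> str:
--     lines = [
--         ".ORG 0x10100",
--         "",
--         "start:",
--         "    MV A, 0xA5",
--     ]
--     for _ in range(count):
--         lines.append("    PUSHU A")
--         lines.append("    SC")
--         lines.append("    POPU IMR")
--     lines.append("    RETF")
--     lines.append("")
--     return "\n".join(lines)
-- ===== SOURCE B (Python) =====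
-- def build_asm_pushu_a_sc_popu_imr_chain(count: int) -> str:
--     header = ".ORG 0x10100\n\nstart:\n    MV A, 0xA5\n"
--     block = "    PUSHU A\n    SC\n    POPU IMR\n"
--     return header + block * count + "    RETF\n"
-- ===== Notes on version B (the rewrite author's own statement) =====
-- stated objective: simpler
-- what changed: Replaces the list-accumulator loop (append three lines per iteration, then join) by a closed-form concatenation header + block*count + footer of three string constants.
import Mathlib
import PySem

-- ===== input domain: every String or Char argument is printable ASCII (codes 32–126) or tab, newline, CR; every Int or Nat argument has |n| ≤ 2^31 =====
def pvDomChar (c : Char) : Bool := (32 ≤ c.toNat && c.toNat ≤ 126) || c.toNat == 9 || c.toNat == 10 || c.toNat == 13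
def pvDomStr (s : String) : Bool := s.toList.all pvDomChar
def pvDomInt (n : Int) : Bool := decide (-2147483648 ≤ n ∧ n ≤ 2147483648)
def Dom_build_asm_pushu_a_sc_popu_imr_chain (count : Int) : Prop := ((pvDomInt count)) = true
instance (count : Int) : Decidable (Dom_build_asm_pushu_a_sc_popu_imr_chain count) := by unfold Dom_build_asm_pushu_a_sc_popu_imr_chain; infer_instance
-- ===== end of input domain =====

-- B replaces the per-iteration append loop by a closed-form header ++ block*count ++ footer concatenation (objective: simpler).

-- ===== PORT A =====
def build_asm_pushu_a_sc_popu_imr_chain (count : Int) : String :=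
  let lines : List String := [".ORG 0x10100", "", "start:", "    MV A, 0xA5"]
  let lines := (PySem.List.pyRange 0 count 1).foldl
    (fun acc _ => ((acc ++ ["    PUSHU A"]) ++ ["    SC"]) ++ ["    POPU IMR"]) lines
  let lines := (lines ++ ["    RETF"]) ++ [""]
  PySem.Str.join "\n" lines

-- ===== PORT B =====
-- Python's 'block * count' (empty for count ≤ 0): left-to-right repetition of the string.
def pvStrMul (s : String) : Nat → String
  | 0 => ""
  | Nat.succ m => s ++ pvStrMul s m

def build_asm_pushu_a_sc_popu_imr_chain_alt (count : Int) : String :=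
  ".ORG 0x10100\n\nstart:\n    MV A, 0xA5\n"
    ++ pvStrMul "    PUSHU A\n    SC\n    POPU IMR\n" count.toNat
    ++ "    RETF\n"

-- ===== PRECONDITION & SPEC =====
def Spec_build_asm_pushu_a_sc_popu_imr_chain (count : Int) (out : String) : Prop := out = build_asm_pushu_a_sc_popu_imr_chain_alt count
instance (count : Int) (out : String) : Decidable (Spec_build_asm_pushu_a_sc_popu_imr_chain count out) := by unfold Spec_build_asm_pushu_a_sc_popu_imr_chain; infer_instance

-- ===== CLAIM (what is proved, stated in full; the proofs are below) =====
def Claim_equal_build_asm_pushu_a_sc_popu_imr_chain : Prop := ∀ (count : Int), Dom_build_asm_pushu_a_sc_popu_imr_chain count → Spec_build_asm_pushu_a_sc_popu_imr_chain count (build_asm_pushu_a_sc_popu_imr_chain count)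

-- ===== LEMMAS AND PROOFS =====

-- the three repeated lines, as a list of lines
def pvTriple : List String := ["    PUSHU A", "    SC", "    POPU IMR"]

-- A's loop appends the triple once per range element
theorem pv_fold_eq (r : List Int) (acc : List String) :
    r.foldl (fun acc _ => ((acc ++ ["    PUSHU A"]) ++ ["    SC"]) ++ ["    POPU IMR"]) acc
      = acc ++ (List.replicate r.length pvTriple).flatten := by
  induction r generalizing acc with
  | nil => simp
  | cons x xs ih =>
      simp only [List.foldl_cons, List.length_cons, List.replicate_succ, List.flatten_cons,
        pvTriple, List.append_assoc]
      simp

theorem pv_join_cons_ne (sep p : List Char) (l : List (List Char)) (h : l ≠ []) :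
    PySem.Chars.join sep (p :: l) = p ++ sep ++ PySem.Chars.join sep l := by
  cases l with
  | nil => exact absurd rfl h
  | cons q rest => exact PySem.Chars.join_cons_cons sep p q rest

-- the core: joining the repeated block plus the footer lines
theorem pv_core (n : Nat) :
    PySem.Chars.join "\n".toList
        ((List.replicate n ["    PUSHU A".toList, "    SC".toList, "    POPU IMR".toList]).flatten
          ++ ["    RETF".toList, "".toList])
      = (pvStrMul "    PUSHU A\n    SC\n    POPU IMR\n" n).toList ++ "    RETF\n".toList := by
  induction n with
  | zero =>
      simp only [List.replicate, List.flatten_nil, List.nil_append, pvStrMul]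
      rw [PySem.Chars.join_cons_cons, PySem.Chars.join_singleton]
      decide
  | succ m ih =>
      simp only [List.replicate_succ, List.flatten_cons, List.cons_append, List.nil_append]
      have hne : (List.replicate m ["    PUSHU A".toList, "    SC".toList, "    POPU IMR".toList]).flatten
          ++ ["    RETF".toList, "".toList] ≠ [] := by simp
      rw [PySem.Chars.join_cons_cons, PySem.Chars.join_cons_cons, pv_join_cons_ne _ _ _ hne, ih]
      simp only [pvStrMul, String.toList_append]
      generalize (pvStrMul "    PUSHU A\n    SC\n    POPU IMR\n" m).toList = l
      simp only [← List.append_assoc]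
      congr 2

theorem build_asm_pushu_a_sc_popu_imr_chain_eq (count : Int) :
    build_asm_pushu_a_sc_popu_imr_chain count = build_asm_pushu_a_sc_popu_imr_chain_alt count := by
  apply String.toList_inj.mp
  unfold build_asm_pushu_a_sc_popu_imr_chain build_asm_pushu_a_sc_popu_imr_chain_alt
  simp only []
  rw [pv_fold_eq]
  have hlen : (PySem.List.pyRange 0 count 1).length = count.toNat := by
    rw [PySem.List.length_pyRange_one]; omega
  rw [hlen, PySem.Str.toList_join]
  simp only [pvTriple, List.append_assoc, List.map_append, List.map_cons, List.map_nil,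
    List.map_flatten, List.map_replicate, List.cons_append, List.nil_append]
  rw [pv_join_cons_ne, pv_join_cons_ne, pv_join_cons_ne, pv_join_cons_ne]
  · rw [pv_core]
    simp only [String.toList_append]
    generalize (pvStrMul "    PUSHU A\n    SC\n    POPU IMR\n" count.toNat).toList = l
    simp only [← List.append_assoc]
    congr 2
  all_goals simp

-- ===== VERDICT (by name: the statement is the Claim_ definition above) =====
theorem build_asm_pushu_a_sc_popu_imr_chain_spec : Claim_equal_build_asm_pushu_a_sc_popu_imr_chain := by
  intro count _
  exact build_asm_pushu_a_sc_popu_imr_chain_eq count
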